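-- pv_equiv track=rewrite | github.com/justdoths-dev/trading-bot | src/research/recent_window_candidate_visibility_diagnosis_v2.py | _filter_recent_labeled_row_indices
-- ===== SOURCE A (Python) =====
-- from typing import Any
--
-- def _normalize_label(value: Any) -> str | None:
--     if isinstance(value, str):
--         text = value.strip().lower()
--         if text in {"up", "down", "flat"}:
--             return text
--     return None
--
-- def _filter_recent_labeled_row_indices(
--     indexed_rows: list[tuple[int, dict[str, Any]]],
--     horizon: str,
--     window: int,
-- ) -> list[int]:
--     label_key = f"future_label_{horizon}"
--     labeled = [
--         index
--         for index, row in indexed_rows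
--         if _normalize_label(row.get(label_key)) is not None
--     ]
--     return labeled[-window:] if window > 0 else labeled
-- ===== SOURCE B (Python) =====
-- from typing import Any
--
-- def _normalize_label(value: Any) -> str | None:
--     if isinstance(value, str):
--         text = value.strip().lower()
--         if text in {"up", "down", "flat"}:
--             return text
--     return None
--
-- def _filter_recent_labeled_row_indices(
--     indexed_rows: list[tuple[int, dict[str, Any]]],
--     horizon: str,
--     window: int,
-- ) -> list[int]:
--     label_key = f"future_label_{horizon}"
--     if window <= 0:
--         out = []
--         for index, row in indexed_rows:
--             if _normalize_label(row.get(label_key)) is not None: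
--                 out.append(index)
--         return out
--     out = []
--     remaining = window
--     for index, row in reversed(indexed_rows):
--         if remaining == 0:
--             break
--         if _normalize_label(row.get(label_key)) is not None:
--             out.append(index)
--             remaining -= 1
--     out.reverse()
--     return out
-- ===== Notes on version B (the rewrite author's own statement) =====
-- stated objective: alternative
-- what changed: Instead of building the full list of labeled indices and slicing off the last `window`, B walks indexed_rows back-to-front collecting at most `window` labeled indices with early termination, reversing the collected list at the end (full forward pass only when window <= 0).
import Mathlib
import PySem

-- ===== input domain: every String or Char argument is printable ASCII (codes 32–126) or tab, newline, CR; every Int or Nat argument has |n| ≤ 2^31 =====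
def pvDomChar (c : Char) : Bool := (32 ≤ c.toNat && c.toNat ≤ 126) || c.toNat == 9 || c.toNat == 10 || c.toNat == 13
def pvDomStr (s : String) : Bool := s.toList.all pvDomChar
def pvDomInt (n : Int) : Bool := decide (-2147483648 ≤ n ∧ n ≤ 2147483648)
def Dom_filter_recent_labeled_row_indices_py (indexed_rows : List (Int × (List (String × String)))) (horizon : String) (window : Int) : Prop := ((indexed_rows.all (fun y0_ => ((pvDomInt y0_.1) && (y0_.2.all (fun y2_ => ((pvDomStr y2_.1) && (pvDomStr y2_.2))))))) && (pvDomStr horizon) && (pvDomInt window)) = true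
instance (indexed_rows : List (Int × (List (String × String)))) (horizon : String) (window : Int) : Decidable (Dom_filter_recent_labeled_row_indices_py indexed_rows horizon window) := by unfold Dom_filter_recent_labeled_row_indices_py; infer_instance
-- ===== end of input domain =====

-- B walks the rows back-to-front collecting at most `window` labeled indices with early
-- termination (then reverses), instead of A's full forward list plus negative slice;
-- objective: alternative decomposition, same cost.

-- shared module helper _normalize_label (used by both Python versions)
def pvNormLabel (value : Option String) : Option String :=
  match value with
  | none => none
  | some s =>
    let text := PySem.Str.lower (PySem.Str.strip s)
    if text = "up" ∨ text = "down" ∨ text = "flat" then some text else none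

-- ===== PORT A =====
def filter_recent_labeled_row_indices_py (indexed_rows : List (Int × (List (String × String)))) (horizon : String) (window : Int) : List Int :=
  let label_key := "future_label_" ++ horizon
  let labeled := indexed_rows.filterMap
    (fun p => if (pvNormLabel (List.lookup label_key p.2)).isSome then some p.1 else none)
  if window > 0 then PySem.List.slice labeled (some (-window)) none else labeled

-- ===== PORT B =====
-- reverse loop of Source B: stop when `remaining` hits 0, append labeled indices to `out`
def pvGoB (label_key : String) : List (Int × (List (String × String))) → Nat → List Int → List Int
  | [], _, out => out
  | p :: rest, remaining, out =>
    if remaining = 0 then out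
    else if (pvNormLabel (List.lookup label_key p.2)).isSome then
      pvGoB label_key rest (remaining - 1) (out ++ [p.1])
    else pvGoB label_key rest remaining out

def filter_recent_labeled_row_indices_py_alt (indexed_rows : List (Int × (List (String × String)))) (horizon : String) (window : Int) : List Int :=
  let label_key := "future_label_" ++ horizon
  if window ≤ 0 then
    indexed_rows.foldl
      (fun out p => if (pvNormLabel (List.lookup label_key p.2)).isSome then out ++ [p.1] else out) []
  else
    (pvGoB label_key indexed_rows.reverse window.toNat []).reverse

-- ===== PRECONDITION & SPEC =====
def Spec_filter_recent_labeled_row_indices_py (indexed_rows : List (Int × (List (String × String)))) (horizon : String) (window : Int) (out : List Int) : Prop := out = filter_recent_labeled_row_indices_py_alt indexed_rows horizon window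
instance (indexed_rows : List (Int × (List (String × String)))) (horizon : String) (window : Int) (out : List Int) : Decidable (Spec_filter_recent_labeled_row_indices_py indexed_rows horizon window out) := by unfold Spec_filter_recent_labeled_row_indices_py; infer_instance

-- ===== CLAIM (what is proved, stated in full; the proofs are below) =====
def Claim_equal_filter_recent_labeled_row_indices_py : Prop := ∀ (indexed_rows : List (Int × (List (String × String)))) (horizon : String) (window : Int), Dom_filter_recent_labeled_row_indices_py indexed_rows horizon window → Spec_filter_recent_labeled_row_indices_py indexed_rows horizon window (filter_recent_labeled_row_indices_py indexed_rows horizon window)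

-- ===== LEMMAS AND PROOFS =====

-- B's forward loop is A's comprehension
theorem pv_foldl_eq_filterMap (f : (Int × (List (String × String))) → Bool)
    (l : List (Int × (List (String × String)))) (acc : List Int) :
    l.foldl (fun out p => if f p then out ++ [p.1] else out) acc
      = acc ++ l.filterMap (fun p => if f p then some p.1 else none) := by
  induction l generalizing acc with
  | nil => simp
  | cons x xs ih =>
    by_cases h : f x <;> simp [List.foldl_cons, h, ih]

-- B's reverse loop collects the first `rem` labeled indices of its argument
theorem pv_goB_eq (key : String) (l : List (Int × (List (String × String))))
    (rem : Nat) (out : List Int) :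
    pvGoB key l rem out
      = out ++ (l.filterMap (fun p => if (pvNormLabel (List.lookup key p.2)).isSome then some p.1 else none)).take rem := by
  induction l generalizing rem out with
  | nil => simp [pvGoB]
  | cons x xs ih =>
    rcases rem with _ | r
    · simp [pvGoB]
    · by_cases h : (pvNormLabel (List.lookup key x.2)).isSome
      · simp [pvGoB, h, ih]
      · simp [pvGoB, h, ih]

theorem pv_rev_take_rev (xs : List Int) (n : Nat) :
    (xs.reverse.take n).reverse = xs.drop (xs.length - n) := by
  rcases Nat.le_total n xs.length with h | h
  · rw [List.take_reverse, List.reverse_reverse]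
  · rw [List.take_of_length_le (by simpa using h), List.reverse_reverse,
      Nat.sub_eq_zero_of_le h, List.drop_zero]

-- ===== VERDICT (by name: the statement is the Claim_ definition above) =====
theorem filter_recent_labeled_row_indices_py_spec : Claim_equal_filter_recent_labeled_row_indices_py := by
  intro rows horizon window _
  unfold Spec_filter_recent_labeled_row_indices_py
  unfold filter_recent_labeled_row_indices_py filter_recent_labeled_row_indices_py_alt
  set key := "future_label_" ++ horizon with hkey
  set f : (Int × (List (String × String))) → Option Int :=
    fun p => if (pvNormLabel (List.lookup key p.2)).isSome then some p.1 else none with hf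
  by_cases hw : window > 0
  · have hle : ¬ window ≤ 0 := by omega
    simp only [hw, hle, if_pos, if_false]
    rw [pv_goB_eq, List.nil_append, List.filterMap_reverse, pv_rev_take_rev]
    have hneg : -window = -((window.toNat : Nat) : Int) := by omega
    rw [hneg, PySem.List.slice_from_neg_natCast _ _ (by omega)]
  · have hle : window ≤ 0 := by omega
    simp only [hw, hle, if_true, if_false]
    rw [pv_foldl_eq_filterMap (fun p => (pvNormLabel (List.lookup key p.2)).isSome)]
    simp
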